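-- pv_equiv track=rewrite | github.com/kwasniewski27/prg-basics | 15-FinalGrades/próbnytest/p10.py | f
-- ===== SOURCE A (Python) =====
-- def f(array):
--     min_value = array[0][0]
--     min_row = -1
--     min_col = -1
--     for i in range(len(array)):
--         for j in range(len(array[i])):
--             if array[i][j]<min_value:
--                 min_value = array[i][j]
--                 min_row = i
--                 min_col = j
--     if min_col == min_row:
--         return True
--     else:
--         return False
-- ===== SOURCE B (Python) =====
-- def f(array):
--     best = array[0][0]
--     for row in array:
--         for x in row:
--             if x < best:
--                 best = x
--     for i, row in enumerate(array):
--         if best in row: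
--             return i == row.index(best)
-- ===== Notes on version B (the rewrite author's own statement) =====
-- stated objective: alternative
-- what changed: A tracks the minimum's (row,col) with sentinels in one index-driven pass; B computes the minimum value in one pass and then locates its first occurrence with enumerate/in/index in a second pass, comparing row index to column index.
import Mathlib
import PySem

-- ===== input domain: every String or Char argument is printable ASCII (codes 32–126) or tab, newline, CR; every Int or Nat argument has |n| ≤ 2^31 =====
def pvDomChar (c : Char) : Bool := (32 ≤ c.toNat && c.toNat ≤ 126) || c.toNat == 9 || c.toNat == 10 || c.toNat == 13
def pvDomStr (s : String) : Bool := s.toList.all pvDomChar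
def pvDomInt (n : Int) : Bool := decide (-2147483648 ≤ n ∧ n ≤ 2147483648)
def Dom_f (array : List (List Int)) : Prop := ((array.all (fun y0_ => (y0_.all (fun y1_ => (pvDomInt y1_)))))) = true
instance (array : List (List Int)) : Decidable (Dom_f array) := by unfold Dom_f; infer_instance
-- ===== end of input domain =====

-- B replaces A's single index-driven pass with sentinel (row,col) tracking by a two-pass
-- min-then-locate decomposition (alternative decomposition, same asymptotic cost).

-- ===== PORT A =====
def f (array : List (List Int)) : Bool :=
  let minv0 := PySem.List.pyGetD (PySem.List.pyGetD array 0 []) 0 0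
  let s :=
    (PySem.List.pyRange 0 (array.length : Int) 1).foldl
      (fun s i =>
        (PySem.List.pyRange 0 ((PySem.List.pyGetD array i []).length : Int) 1).foldl
          (fun s j =>
            if PySem.List.pyGetD (PySem.List.pyGetD array i []) j 0 < s.1
            then (PySem.List.pyGetD (PySem.List.pyGetD array i []) j 0, i, j) else s)
          s)
      (minv0, (-1 : Int), (-1 : Int))
  s.2.1 == s.2.2

-- ===== PORT B =====
-- second pass of Source B: first row containing `best`, compare row index with position
def fAltLoc (best : Int) : List (Int × List Int) → Bool
  | [] => false
  | (i, row) :: rest =>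
    match PySem.List.index? row best with
    | some j => i == (j : Int)
    | none => fAltLoc best rest

def f_alt (array : List (List Int)) : Bool :=
  let best := array.foldl (fun b row => row.foldl (fun b x => if x < b then x else b) b)
      (PySem.List.pyGetD (PySem.List.pyGetD array 0 []) 0 0)
  fAltLoc best (PySem.List.enumerate array 0)

-- ===== PRECONDITION & SPEC =====
-- A evaluates array[0][0] first: it raises IndexError iff the array or its first row is empty.
def Pre_f (array : List (List Int)) : Prop := array ≠ [] ∧ array.getD 0 [] ≠ []
instance (array : List (List Int)) : Decidable (Pre_f array) := by unfold Pre_f; infer_instance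
def pvWitness_f : List (List Int) := [[3, 1], [0, 2]]

def Spec_f (array : List (List Int)) (out : Bool) : Prop := out = f_alt array
instance (array : List (List Int)) (out : Bool) : Decidable (Spec_f array out) := by unfold Spec_f; infer_instance

-- ===== CLAIM (what is proved, stated in full; the proofs are below) =====
def Claim_equal_f : Prop := ∀ (array : List (List Int)), Dom_f array → Pre_f array → Spec_f array (f array)

-- ===== LEMMAS AND PROOFS =====

-- A's update step on one (position, value) entry
def stepA (s : Int × Int × Int) (q : (Int × Int) × Int) : Int × Int × Int :=
  if q.2 < s.1 then (q.2, q.1.1, q.1.2) else s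

-- row-major flattening with positions, rows numbered from s
def flatFrom (array : List (List Int)) (s : Int) : List ((Int × Int) × Int) :=
  (PySem.List.enumerate array s).flatMap
    (fun r => (PySem.List.enumerate r.2 0).map (fun q => ((r.1, q.1), q.2)))

-- running minimum of the values, seeded with b
def rmin (L : List ((Int × Int) × Int)) (b : Int) : Int :=
  L.foldl (fun b q => if q.2 < b then q.2 else b) b

theorem foldl_flatMap_eq {α β γ : Type} (l : List α) (g : α → List β) (fn : γ → β → γ)
    (init : γ) :
    (l.flatMap g).foldl fn init = l.foldl (fun acc r => (g r).foldl fn acc) init := by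
  induction l generalizing init with
  | nil => rfl
  | cons a l ih => simp [List.flatMap_cons, List.foldl_append, ih]

theorem rmin_le (L : List ((Int × Int) × Int)) (b : Int) : rmin L b ≤ b := by
  induction L generalizing b with
  | nil => simp [rmin]
  | cons q L ih =>
    simp only [rmin, List.foldl_cons]
    by_cases h : q.2 < b
    · simp only [if_pos h]; exact le_trans (ih q.2) (le_of_lt h)
    · simp only [if_neg h]; exact ih b

theorem rmin_min (L : List ((Int × Int) × Int)) (b : Int) :
    ∀ q ∈ L, rmin L b ≤ q.2 := by
  induction L generalizing b with
  | nil => simp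
  | cons p L ih =>
    intro q hq
    simp only [rmin, List.foldl_cons]
    rcases List.mem_cons.1 hq with rfl | hq
    · by_cases h : q.2 < b
      · simp only [if_pos h]; exact rmin_le L q.2
      · simp only [if_neg h]
        exact le_trans (rmin_le L b) (le_of_not_gt h)
    · by_cases h : p.2 < b
      · simp only [if_pos h]; exact ih p.2 q hq
      · simp only [if_neg h]; exact ih b q hq

theorem foldA_unchanged (L : List ((Int × Int) × Int)) (b r c : Int)
    (h : ∀ q ∈ L, b ≤ q.2) :
    L.foldl stepA (b, r, c) = (b, r, c) := by
  induction L with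
  | nil => rfl
  | cons q L ih =>
    have hq : b ≤ q.2 := h q (List.mem_cons_self ..)
    simp only [List.foldl_cons, stepA, if_neg (not_lt.2 hq)]
    exact ih (fun p hp => h p (List.mem_cons_of_mem _ hp))

theorem foldA_char (L : List ((Int × Int) × Int)) (b r c : Int)
    (h : rmin L b < b) :
    ∃ q1, L.find? (fun q => q.2 == rmin L b) = some q1 ∧
      L.foldl stepA (b, r, c) = (rmin L b, q1.1.1, q1.1.2) := by
  induction L generalizing b r c with
  | nil => simp [rmin] at h
  | cons q L ih =>
    have hr : rmin (q :: L) b = rmin L (if q.2 < b then q.2 else b) := rfl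
    by_cases hq : q.2 < b
    · simp only [if_pos hq] at hr
      by_cases hlt : rmin L q.2 < q.2
      · obtain ⟨q1, hfind, hfold⟩ := ih q.2 q.1.1 q.1.2 hlt
        refine ⟨q1, ?_, ?_⟩
        · have hpq : ((q.2 : Int) == rmin (q :: L) b) = false := by
            rw [hr]; exact beq_eq_false_iff_ne.2 (by omega)
          rw [List.find?_cons_of_neg (by simp [hpq]), hr, hfind]
        · simp only [List.foldl_cons, stepA, if_pos hq, hfold, hr]
      · have heq : rmin L q.2 = q.2 := le_antisymm (rmin_le L q.2) (le_of_not_gt hlt)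
        refine ⟨q, ?_, ?_⟩
        · rw [List.find?_cons_of_pos]
          simp [hr, heq]
        · have : L.foldl stepA (q.2, q.1.1, q.1.2) = (q.2, q.1.1, q.1.2) := by
            apply foldA_unchanged
            intro p hp
            have := rmin_min L q.2 p hp
            omega
          simp only [List.foldl_cons, stepA, if_pos hq, this, hr, heq]
    · simp only [if_neg hq] at hr
      rw [hr] at h
      obtain ⟨q1, hfind, hfold⟩ := ih b r c h
      refine ⟨q1, ?_, ?_⟩
      · have hpq : ((q.2 : Int) == rmin (q :: L) b) = false := by
          rw [hr]; exact beq_eq_false_iff_ne.2 (by omega)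
        rw [List.find?_cons_of_neg (by simp [hpq]), hr, hfind]
      · simp only [List.foldl_cons, stepA, if_neg hq, hfold, hr]

-- pyRange-over-indices fold = fold over enumerate
theorem foldl_pyRange_enumerate {α γ : Type} (xs : List α) (d : α) (g : γ → Int → α → γ)
    (init : γ) :
    (PySem.List.pyRange 0 (xs.length : Int) 1).foldl
        (fun st i => g st i (PySem.List.pyGetD xs i d)) init
      = (PySem.List.enumerate xs 0).foldl (fun st p => g st p.1 p.2) init := by
  conv_rhs => rw [PySem.List.enumerate_eq_map_pyRange (d := d)]
  rw [List.foldl_map]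
  simp

theorem flatFrom_nil (s : Int) : flatFrom [] s = [] := by
  simp [flatFrom, PySem.List.enumerate_nil]

theorem flatFrom_cons (row : List Int) (rest : List (List Int)) (s : Int) :
    flatFrom (row :: rest) s =
      (PySem.List.enumerate row 0).map (fun q => ((s, q.1), q.2)) ++ flatFrom rest (s + 1) := by
  simp [flatFrom, PySem.List.enumerate_cons]

theorem foldl_enumerate_snd {α γ : Type} (row : List α) (g : γ → α → γ) (b : γ) (s : Int) :
    (PySem.List.enumerate row s).foldl (fun b q => g b q.2) b = row.foldl g b := by
  induction row generalizing s b with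
  | nil => simp [PySem.List.enumerate_nil]
  | cons x row ih => simp [PySem.List.enumerate_cons, ih]

-- A as a single fold of stepA over the flattened array
theorem f_eq_flat (array : List (List Int)) :
    f array =
      (((flatFrom array 0).foldl stepA
          (PySem.List.pyGetD (PySem.List.pyGetD array 0 []) 0 0, (-1 : Int), (-1 : Int))).2.1 ==
       ((flatFrom array 0).foldl stepA
          (PySem.List.pyGetD (PySem.List.pyGetD array 0 []) 0 0, (-1 : Int), (-1 : Int))).2.2) := by
  unfold f
  dsimp only
  have h1 := foldl_pyRange_enumerate (xs := array) (d := ([] : List Int))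
      (g := fun st i v =>
        (PySem.List.pyRange 0 (v.length : Int) 1).foldl
          (fun s j => if PySem.List.pyGetD v j 0 < s.1 then (PySem.List.pyGetD v j 0, i, j) else s) st)
      (init := (PySem.List.pyGetD (PySem.List.pyGetD array 0 []) 0 0, (-1 : Int), (-1 : Int)))
  beta_reduce at h1
  rw [h1]
  have h2 : (fun (st : Int × Int × Int) (p : Int × List Int) =>
        (PySem.List.pyRange 0 (p.2.length : Int) 1).foldl
          (fun s j => if PySem.List.pyGetD p.2 j 0 < s.1 then (PySem.List.pyGetD p.2 j 0, p.1, j) else s) st)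
      = (fun st p => (PySem.List.enumerate p.2 0).foldl
          (fun st q => stepA st ((p.1, q.1), q.2)) st) := by
    funext st p
    have h3 := foldl_pyRange_enumerate (xs := p.2) (d := (0 : Int))
        (g := fun s j x => if x < s.1 then (x, p.1, j) else s) (init := st)
    beta_reduce at h3
    rw [h3]
    rfl
  rw [h2]
  unfold flatFrom
  rw [foldl_flatMap_eq]
  simp only [List.foldl_map]

-- B's minimum equals rmin of the flattened array
theorem best_eq_rmin (array : List (List Int)) (s b : Int) :
    array.foldl (fun b row => row.foldl (fun b x => if x < b then x else b) b) b =
      rmin (flatFrom array s) b := by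
  induction array generalizing s b with
  | nil => simp [flatFrom_nil, rmin]
  | cons row rest ih =>
    rw [flatFrom_cons]
    simp only [List.foldl_cons, rmin, List.foldl_append, List.foldl_map]
    rw [foldl_enumerate_snd row (fun b x => if x < b then x else b) b 0]
    exact ih (s + 1) _

-- find? on one enumerated row vs index?
theorem find?_enumerate_row (row : List Int) (best : Int) (s : Int) :
    (PySem.List.enumerate row s).find? (fun q => q.2 == best) =
      (PySem.List.index? row best).map (fun j => ((s + (j : Int)), best)) := by
  induction row generalizing s with
  | nil => simp [PySem.List.enumerate_nil, PySem.List.index?_eq_idxOf?]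
  | cons x row ih =>
    rw [PySem.List.enumerate_cons]
    by_cases hx : x = best
    · subst hx
      rw [List.find?_cons_of_pos (by simp), PySem.List.index?_cons_self]
      simp
    · rw [List.find?_cons_of_neg (by simp [hx]), PySem.List.index?_cons_of_ne _ hx, ih]
      cases PySem.List.index? row best with
      | none => simp
      | some j =>
        simp
        omega

-- B's second pass as a find? over the flattened array
theorem fAltLoc_eq_find (array : List (List Int)) (best : Int) (s : Int) :
    fAltLoc best (PySem.List.enumerate array s) =
      (match (flatFrom array s).find? (fun q => q.2 == best) with
       | some q1 => q1.1.1 == q1.1.2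
       | none => false) := by
  induction array generalizing s with
  | nil => simp [PySem.List.enumerate_nil, flatFrom_nil, fAltLoc]
  | cons row rest ih =>
    rw [PySem.List.enumerate_cons, flatFrom_cons, List.find?_append, List.find?_map]
    have hcomp : ((fun (q : (Int × Int) × Int) => q.2 == best) ∘ (fun (q : Int × Int) => ((s, q.1), q.2)))
        = (fun (q : Int × Int) => q.2 == best) := rfl
    rw [hcomp, find?_enumerate_row row best 0]
    cases h : PySem.List.index? row best with
    | none =>
      simp only [PySem.List.index?_eq_idxOf?] at h
      simp [fAltLoc, h, ih]
    | some j =>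
      simp only [PySem.List.index?_eq_idxOf?] at h
      simp [fAltLoc, h]

theorem f_alt_eq (array : List (List Int)) :
    f_alt array =
      fAltLoc (rmin (flatFrom array 0) (PySem.List.pyGetD (PySem.List.pyGetD array 0 []) 0 0))
        (PySem.List.enumerate array 0) := by
  unfold f_alt
  dsimp only
  rw [best_eq_rmin array 0]

-- ===== VERDICT (by name: the statement is the Claim_ definition above) =====
theorem f_spec : Claim_equal_f := by
  unfold Claim_equal_f
  intro array hdom hpre
  unfold Spec_f
  obtain ⟨hne, hrow⟩ := hpre
  match array, hne, hrow with
  | ((x :: t) :: rest), _, _ =>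
  have ha00 : PySem.List.pyGetD (PySem.List.pyGetD ((x :: t) :: rest) 0 []) 0 0 = x := by
    simp [PySem.List.pyGetD_zero_cons]
  rw [f_eq_flat, f_alt_eq]
  simp only [ha00]
  by_cases h : rmin (flatFrom ((x :: t) :: rest) 0) x < x
  · obtain ⟨q1, hfind, hfold⟩ := foldA_char (flatFrom ((x :: t) :: rest) 0) x (-1) (-1) h
    rw [hfold, fAltLoc_eq_find, hfind]
  · have hx : rmin (flatFrom ((x :: t) :: rest) 0) x = x :=
      le_antisymm (rmin_le _ _) (not_lt.1 h)
    have hunch := foldA_unchanged (flatFrom ((x :: t) :: rest) 0) x (-1) (-1)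
      (fun q hq => by have := rmin_min (flatFrom ((x :: t) :: rest) 0) x q hq; omega)
    rw [hunch, hx, PySem.List.enumerate_cons]
    simp [fAltLoc, PySem.List.index?_eq_idxOf?, List.idxOf?_cons]
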